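-- pv_equiv track=rewrite | github.com/thiernothierno/Technical-Interview-Prep-Summer-2025- | Unit_2/unit_2_session_2.py | count_endangered_species
-- ===== SOURCE A (Python) =====
-- def count_endangered_species(endangered_species, observed_species):
--     """count the number of endangered species observed."""
--     my_dict = {}
--     for char in observed_species:
--         if char not in my_dict:
--             my_dict[char] = 1
--         else:
--             my_dict[char] += 1
--
--     count = 0
--     endangered_species = set(endangered_species)
--     for c in endangered_species:
--         if c in my_dict:
--             count += my_dict[c]
--     return count
-- ===== SOURCE B (Python) =====
-- def count_endangered_species(endangered_species, observed_species):
--     """count the number of endangered species observed."""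
--     endangered = set(endangered_species)
--     return sum(1 for s in observed_species if s in endangered)
-- ===== Notes on version B (the rewrite author's own statement) =====
-- stated objective: simpler
-- what changed: Replaced the observed-frequency dict built in one loop plus a second lookup loop over the endangered set by a single filtering/summation pass over observed_species against an endangered membership set.
import Mathlib
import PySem

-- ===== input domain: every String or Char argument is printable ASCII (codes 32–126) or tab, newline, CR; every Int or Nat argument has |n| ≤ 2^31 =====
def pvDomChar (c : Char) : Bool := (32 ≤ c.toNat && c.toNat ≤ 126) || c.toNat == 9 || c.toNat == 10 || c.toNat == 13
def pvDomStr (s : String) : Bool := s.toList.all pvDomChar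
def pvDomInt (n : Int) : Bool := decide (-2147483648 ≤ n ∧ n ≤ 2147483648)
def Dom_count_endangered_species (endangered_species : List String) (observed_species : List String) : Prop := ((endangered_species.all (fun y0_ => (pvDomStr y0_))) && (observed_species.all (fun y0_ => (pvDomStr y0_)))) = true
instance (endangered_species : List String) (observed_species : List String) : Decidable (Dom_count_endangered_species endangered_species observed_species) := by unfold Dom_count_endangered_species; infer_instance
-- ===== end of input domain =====

-- B replaces A's observed-frequency dict + lookup loop over the endangered set by one
-- filtering/summation pass over observed_species against an endangered membership set (simpler).

-- ===== PORT A =====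
def count_endangered_species (endangered_species : List String) (observed_species : List String) : Int :=
  let my_dict : PySem.Dict String Int :=
    observed_species.foldl
      (fun d char =>
        if d.contains char = false then d.insert char 1
        else d.modify char 0 (· + 1))
      PySem.Dict.empty
  let es : PySem.Set String := PySem.Set.ofList endangered_species
  es.foldl (fun count c => if my_dict.contains c then count + my_dict.getD c 0 else count) 0

-- ===== PORT B =====
def count_endangered_species_alt (endangered_species : List String) (observed_species : List String) : Int :=
  let endangered : PySem.Set String := PySem.Set.ofList endangered_species
  ((observed_species.filter (fun s => endangered.contains s)).map (fun _ => (1 : Int))).sum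

-- ===== PRECONDITION & SPEC =====
def Spec_count_endangered_species (endangered_species : List String) (observed_species : List String) (out : Int) : Prop := out = count_endangered_species_alt endangered_species observed_species
instance (endangered_species : List String) (observed_species : List String) (out : Int) : Decidable (Spec_count_endangered_species endangered_species observed_species out) := by unfold Spec_count_endangered_species; infer_instance

-- ===== CLAIM (what is proved, stated in full; the proofs are below) =====
def Claim_equal_count_endangered_species : Prop := ∀ (endangered_species : List String) (observed_species : List String), Dom_count_endangered_species endangered_species observed_species → Spec_count_endangered_species endangered_species observed_species (count_endangered_species endangered_species observed_species)

-- ===== LEMMAS AND PROOFS =====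

-- A's build loop is exactly the Counter loop: in the missing-key branch the dict holds no
-- binding for char, so insert char 1 is modify char 0 (· + 1).
theorem buildLoop_eq_counter (observed_species : List String) :
    observed_species.foldl
      (fun (d : PySem.Dict String Int) char =>
        if d.contains char = false then d.insert char 1
        else d.modify char 0 (· + 1))
      PySem.Dict.empty = PySem.Dict.counter observed_species := by
  rw [PySem.Dict.counter_eq_foldl]
  apply PySem.List.foldl_congr_mem
  intro d char _hc
  by_cases h : d.contains char = false
  · simp only [h, if_true]
    simp [PySem.Dict.modify, PySem.Dict.getD_of_not_contains _ _ h]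
  · simp [h]

-- sum of the indicator of x over a Nodup list
theorem sum_indicator_nodup (x : String) (d : List String) (hnd : d.Nodup) :
    (d.map (fun c => if x = c then (1 : Int) else 0)).sum
      = if x ∈ d then (1 : Int) else 0 := by
  induction d with
  | nil => simp
  | cons a t ih =>
    simp only [List.nodup_cons] at hnd
    by_cases hxa : x = a
    · subst hxa
      simp [hnd.1, ih hnd.2]
    · simp [hxa, List.mem_cons, ih hnd.2]

-- core identity: summing observed-frequencies over the distinct endangered names
-- equals counting observed elements that are endangered
theorem sum_counts_eq (endangered_species observed_species : List String) :
    ((PySem.Set.ofList endangered_species).map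
        (fun c => (observed_species.count c : Int))).sum
      = ((observed_species.filter
            (fun s => (PySem.Set.ofList endangered_species).contains s)).map
          (fun _ => (1 : Int))).sum := by
  induction observed_species with
  | nil => simp
  | cons x obs ih =>
    have hsplit :
        ((PySem.Set.ofList endangered_species).map
            (fun c => ((x :: obs).count c : Int))).sum
          = ((PySem.Set.ofList endangered_species).map
              (fun c => (obs.count c : Int))).sum
            + ((PySem.Set.ofList endangered_species).map
                (fun c => if x = c then (1 : Int) else 0)).sum := by
      rw [← List.sum_map_add]
      apply congrArg
      apply List.map_congr_left
      intro c _
      rw [List.count_cons]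
      by_cases h : x = c
      · subst h
        rw [beq_self_eq_true]
        norm_num
      · have hne : (x == c) = false := beq_eq_false_iff_ne.mpr h
        rw [hne, if_neg (by decide : ¬ (false = true)), if_neg h]
        ring
    rw [hsplit, ih,
        sum_indicator_nodup x _ (PySem.Set.nodup_ofList endangered_species)]
    by_cases hmem : x ∈ endangered_species
    · simp [PySem.Set.mem_ofList, hmem]
      ring
    · simp [PySem.Set.mem_ofList, hmem]

-- ===== VERDICT (by name: the statement is the Claim_ definition above) =====
theorem count_endangered_species_spec : Claim_equal_count_endangered_species := by
  intro endangered_species observed_species _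
  unfold Spec_count_endangered_species count_endangered_species count_endangered_species_alt
  simp only [buildLoop_eq_counter]
  have hstep :
      (PySem.Set.ofList endangered_species).foldl
          (fun count c =>
            if (PySem.Dict.counter observed_species).contains c then
              count + (PySem.Dict.counter observed_species).getD c 0
            else count) 0
        = ((PySem.Set.ofList endangered_species).map
            (fun c => (observed_species.count c : Int))).sum := by
    have hfun : ∀ (count : Int) (c : String),
        (if (PySem.Dict.counter observed_species).contains c then
            count + (PySem.Dict.counter observed_species).getD c 0
          else count)
          = count + (observed_species.count c : Int) := by
      intro count c
      by_cases h : (PySem.Dict.counter observed_species).contains c = true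
      · simp [h, PySem.Dict.getD_counter]
      · have hnotmem : c ∉ observed_species := by
          intro hm
          exact h (by simpa [PySem.Dict.contains_counter] using hm)
        simp [h, List.count_eq_zero_of_not_mem hnotmem]
    calc (PySem.Set.ofList endangered_species).foldl
            (fun count c =>
              if (PySem.Dict.counter observed_species).contains c then
                count + (PySem.Dict.counter observed_species).getD c 0
              else count) 0
        = (PySem.Set.ofList endangered_species).foldl
            (fun count c => count + (observed_species.count c : Int)) 0 := by
          apply PySem.List.foldl_congr_mem
          intro b a _; exact hfun b a
      _ = ((PySem.Set.ofList endangered_species).map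
            (fun c => (observed_species.count c : Int))).sum := by
          rw [← List.foldl_map, List.sum_eq_foldl]
  rw [hstep, sum_counts_eq]
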